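-- pv_equiv track=rewrite | github.com/markzhang716/py_youth | 源码习题/习题答案/其它章 习题/第6章.py | fn2
-- ===== SOURCE A (Python) =====
-- def fn2(n):
--     if n==1:
--         return 0
--     if n==2:
--         return 1
--     if n==3:
--         return 2
--     return fn2(n-1) + fn2(n-3)
-- ===== SOURCE B (Python) =====
-- def fn2(n):
--     if n == 1:
--         return 0
--     if n == 2:
--         return 1
--     a, b, c = 0, 1, 2
--     for _ in range(n - 3):
--         a, b, c = b, c, c + a
--     return c
-- ===== Notes on version B (the rewrite author's own statement) =====
-- stated objective: faster
-- what changed: Replaced the naive exponential double recursion with an iterative loop keeping the last three terms (a,b,c): A is exponential in n, B linear.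
-- outside the precondition, e.g. on fn2(0): A raises RecursionError, B returns 2
import Mathlib
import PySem

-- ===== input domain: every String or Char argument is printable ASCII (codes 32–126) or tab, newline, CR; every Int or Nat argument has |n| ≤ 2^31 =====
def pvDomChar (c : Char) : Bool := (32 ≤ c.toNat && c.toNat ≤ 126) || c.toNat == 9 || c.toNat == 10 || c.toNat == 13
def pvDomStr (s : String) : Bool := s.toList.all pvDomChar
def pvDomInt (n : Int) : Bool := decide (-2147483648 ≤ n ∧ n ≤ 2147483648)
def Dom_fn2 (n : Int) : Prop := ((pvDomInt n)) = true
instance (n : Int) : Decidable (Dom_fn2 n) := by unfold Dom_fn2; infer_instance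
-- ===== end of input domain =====

-- B replaces A's exponential double recursion by an O(n) loop keeping the last three terms.

-- ===== PORT A =====
-- fuel-based transliteration of A's recursion; fuel n.toNat suffices for every n ≥ 1
-- (each recursive call decreases n by at least 1, base cases at n ≤ 3)
def fn2A : Nat → Int → Int
  | 0, _ => 0
  | fuel+1, n =>
    if n = 1 then 0
    else if n = 2 then 1
    else if n = 3 then 2
    else fn2A fuel (n-1) + fn2A fuel (n-3)

def fn2 (n : Int) : Int := fn2A n.toNat n

-- ===== PORT B =====
def fn2_alt (n : Int) : Int :=
  if n = 1 then 0
  else if n = 2 then 1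
  else
    let s := (PySem.List.pyRange 0 (n-3) 1).foldl
      (fun (s : Int × Int × Int) _ => (s.2.1, s.2.2, s.2.2 + s.1)) (0, 1, 2)
    s.2.2

-- ===== PRECONDITION & SPEC =====
-- A recurses without a base case for n ≤ 0 (RecursionError), so those inputs are excluded.
def Pre_fn2 (n : Int) : Prop := 1 ≤ n
instance (n : Int) : Decidable (Pre_fn2 n) := by unfold Pre_fn2; infer_instance
def pvWitness_fn2 : Int := 6

def Spec_fn2 (n : Int) (out : Int) : Prop := out = fn2_alt n
instance (n : Int) (out : Int) : Decidable (Spec_fn2 n out) := by unfold Spec_fn2; infer_instance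

-- ===== CLAIM (what is proved, stated in full; the proofs are below) =====
def Claim_equal_fn2 : Prop := ∀ (n : Int), Dom_fn2 n → Pre_fn2 n → Spec_fn2 n (fn2 n)

-- ===== LEMMAS AND PROOFS =====

-- reference function: the recurrence on Nat
def F : Nat → Int
  | 0 => 0
  | 1 => 0
  | 2 => 1
  | 3 => 2
  | n+4 => F (n+3) + F (n+1)

lemma fn2A_eq_F : ∀ (fuel : Nat) (n : Int), 1 ≤ n → n.toNat ≤ fuel → fn2A fuel n = F n.toNat := by
  intro fuel
  induction fuel with
  | zero => intro n h1 h2; omega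
  | succ f ih =>
    intro n h1 h2
    rw [fn2A]
    by_cases e1 : n = 1
    · subst e1; simp [F]
    by_cases e2 : n = 2
    · subst e2; simp [F]
    by_cases e3 : n = 3
    · subst e3; simp [F]
    have h4 : 4 ≤ n := by omega
    simp only [if_neg e1, if_neg e2, if_neg e3]
    rw [ih (n-1) (by omega) (by omega), ih (n-3) (by omega) (by omega)]
    obtain ⟨m, hm⟩ : ∃ m : Nat, n.toNat = m + 4 := ⟨n.toNat - 4, by omega⟩
    have h1' : (n-1).toNat = m + 3 := by omega
    have h3' : (n-3).toNat = m + 1 := by omega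
    rw [hm, h1', h3', F]

lemma loop_eq_F : ∀ (m : Nat),
    (PySem.List.pyRange 0 m 1).foldl
      (fun (s : Int × Int × Int) _ => (s.2.1, s.2.2, s.2.2 + s.1)) (0, 1, 2)
    = (F (m+1), F (m+2), F (m+3)) := by
  intro m
  induction m with
  | zero => simp [F]
  | succ k ih =>
    have : ((k:Int) + 1) = ((k+1 : Nat) : Int) := by push_cast; ring
    rw [show ((k+1 : Nat) : Int) = (k : Int) + 1 by push_cast; ring,
        PySem.List.pyRange_one_succ_right (by positivity), List.foldl_append, ih]
    simp only [List.foldl_cons, List.foldl_nil]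
    have : F (k+4) = F (k+3) + F (k+1) := by rw [F]
    rw [show k + 1 + 3 = k + 4 by omega, this]

-- ===== VERDICT (by name: the statement is the Claim_ definition above) =====
theorem fn2_spec : Claim_equal_fn2 := by
  intro n _ hpre
  unfold Spec_fn2 fn2 fn2_alt
  by_cases e1 : n = 1
  · subst e1; simp [fn2A]
  by_cases e2 : n = 2
  · subst e2; simp [fn2A]
  simp only [if_neg e1, if_neg e2]
  rw [fn2A_eq_F n.toNat n hpre le_rfl]
  have h3 : 3 ≤ n := by unfold Pre_fn2 at hpre; omega
  have hm : (n - 3 : Int) = ((n.toNat - 3 : Nat) : Int) := by omega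
  rw [hm, loop_eq_F]
  have : n.toNat - 3 + 3 = n.toNat := by omega
  rw [this]
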